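-- pv_equiv track=rewrite | github.com/Abarn279/advent-of-code-2019 | src/_4b.py | has_adjacent
-- ===== SOURCE A (Python) =====
-- def has_adjacent(x):
--     i = 0
--     while i < len(x):
--         num_same = 1
--         for j in range(i + 1, len(x)):
--             if x[j] == x[i]:
--                 num_same += 1
--             else:
--                 break
--         if num_same == 2:
--             return True
--
--         i += num_same
--     return False
-- ===== SOURCE B (Python) =====
-- def has_adjacent(x):
--     # Single pass with (prev, run) accumulator: when a run ends, test run == 2.
--     prev = None
--     run = 0
--     for c in x:
--         if c == prev:
--             run += 1
--         else:
--             if run == 2: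
--                 return True
--             prev = c
--             run = 1
--     return run == 2
-- ===== Notes on version B (the rewrite author's own statement) =====
-- stated objective: idiomatic
-- what changed: Replaces the while-loop with an inner counting scan (re-reading each run and using indexed access) by a single fold over the characters maintaining a (previous char, current run length) accumulator, testing run == 2 at each run boundary.
import Mathlib
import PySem

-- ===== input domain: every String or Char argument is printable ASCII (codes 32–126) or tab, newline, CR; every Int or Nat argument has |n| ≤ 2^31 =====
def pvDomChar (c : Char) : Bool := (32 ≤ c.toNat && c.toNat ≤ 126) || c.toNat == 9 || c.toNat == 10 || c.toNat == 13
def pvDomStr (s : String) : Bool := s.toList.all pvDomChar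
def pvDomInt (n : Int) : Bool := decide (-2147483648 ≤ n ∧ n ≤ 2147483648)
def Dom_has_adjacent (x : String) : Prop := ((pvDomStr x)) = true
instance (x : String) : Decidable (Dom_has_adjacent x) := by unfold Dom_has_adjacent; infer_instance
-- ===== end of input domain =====

-- B replaces A's while-loop with an inner counting scan by one fold carrying a (prev char, run length) state; same result, same O(n) cost.

-- ===== PORT A =====
-- length of the equal-to-c prefix of l (what A's inner for-loop adds to num_same before breaking)
def pvRunLen (c : Char) : List Char → Nat
  | [] => 0
  | d :: rest => if d == c then 1 + pvRunLen c rest else 0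

-- needed by pvGoA's decreasing_by
theorem pvRunLen_le (c : Char) (l : List Char) : pvRunLen c l ≤ l.length := by
  induction l with
  | nil => simp [pvRunLen]
  | cons d rest ih => simp only [pvRunLen, List.length_cons]; split <;> omega

-- A's outer while-loop: num_same = 1 + inner count, return True if it is 2, else skip the run (i += num_same)
def pvGoA : List Char → Bool
  | [] => false
  | c :: rest =>
    let num_same := 1 + pvRunLen c rest
    if num_same == 2 then true
    else pvGoA (rest.drop (pvRunLen c rest))
termination_by l => l.length
decreasing_by
  have := pvRunLen_le c rest
  simp only [List.length_drop, List.length_cons]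
  omega

def has_adjacent (x : String) : Bool := pvGoA x.toList

-- ===== PORT B =====
-- B's single for-loop: state (prev, run); at each run boundary (and at the end) test run == 2
def pvGoB : Option Char → Nat → List Char → Bool
  | _, run, [] => run == 2
  | prev, run, c :: rest =>
    if some c == prev then pvGoB prev (run + 1) rest
    else if run == 2 then true
    else pvGoB (some c) 1 rest

def has_adjacent_alt (x : String) : Bool := pvGoB none 0 x.toList

-- ===== PRECONDITION & SPEC =====
def Spec_has_adjacent (x : String) (out : Bool) : Prop := out = has_adjacent_alt x
instance (x : String) (out : Bool) : Decidable (Spec_has_adjacent x out) := by unfold Spec_has_adjacent; infer_instance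

-- ===== CLAIM (what is proved, stated in full; the proofs are below) =====
def Claim_equal_has_adjacent : Prop := ∀ (x : String), Dom_has_adjacent x → Spec_has_adjacent x (has_adjacent x)

-- ===== LEMMAS AND PROOFS =====
theorem pvGoA_nil : pvGoA [] = false := by simp [pvGoA]

theorem pvGoA_cons (c : Char) (rest : List Char) : pvGoA (c :: rest) =
    (if 1 + pvRunLen c rest == 2 then true else pvGoA (rest.drop (pvRunLen c rest))) := by
  rw [pvGoA.eq_def]

-- invariant: B mid-run with `run` copies of c already seen behaves like A after finishing that run
theorem pvGoB_run (l : List Char) : ∀ (c : Char) (run : Nat),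
    pvGoB (some c) run l =
      if run + pvRunLen c l = 2 then true else pvGoA (l.drop (pvRunLen c l)) := by
  induction l with
  | nil =>
    intro c run
    simp only [pvGoB, pvRunLen, pvGoA_nil, Nat.add_zero]
    by_cases h : run = 2 <;> simp [h, pvGoA_nil]
  | cons d rest ih =>
    intro c run
    by_cases h : d = c
    · subst h
      simp only [pvGoB, pvRunLen, if_pos rfl, Option.some.injEq, beq_self_eq_true, if_true]
      rw [ih d (run + 1)]
      have he : run + 1 + pvRunLen d rest = run + (1 + pvRunLen d rest) := by omega
      rw [show (1 + pvRunLen d rest) = (pvRunLen d rest) + 1 from by omega] at *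
      simp [he, List.drop_succ_cons]
    · have hne : (some d == some c) = false := by simp [h]
      have hne' : (d == c) = false := by simp [h]
      simp only [pvGoB, pvRunLen, hne, hne', Bool.false_eq_true, if_false, List.drop_zero]
      by_cases hr : run = 2
      · simp [hr]
      · have hnr : ¬ (run + 0 = 2) := by omega
        simp only [if_neg hr, if_neg hnr]
        rw [ih d 1, pvGoA_cons]
        by_cases hk : 1 + pvRunLen d rest = 2 <;> simp [hk, hr]

theorem pvGoAB (l : List Char) : pvGoA l = pvGoB none 0 l := by
  cases l with
  | nil => simp [pvGoA_nil, pvGoB]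
  | cons c rest =>
    simp only [pvGoB, reduceCtorEq, Bool.false_eq_true, if_false,
      if_neg (by decide : ¬ ((0 == 2 : Bool) = true))]
    rw [pvGoB_run rest c 1, pvGoA_cons]
    by_cases hk : 1 + pvRunLen c rest = 2 <;> simp [hk]

-- ===== VERDICT (by name: the statement is the Claim_ definition above) =====
theorem has_adjacent_spec : Claim_equal_has_adjacent := by
  intro x _
  show has_adjacent x = has_adjacent_alt x
  unfold has_adjacent has_adjacent_alt
  exact pvGoAB x.toList
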